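-- pv_equiv track=rewrite | github.com/BlusClues/AI-Project | map_generator.py | remove_isolated_walls
-- ===== SOURCE A (Python) =====
-- WALL = "*"
--
-- OPEN = "."
--
-- def remove_isolated_walls(char_map):
--     rows = len(char_map)
--     columns = len(char_map[0])
--
--     new_map = []
--     for row in char_map:
--         new_map.append(row[:])
--
--     for r in range(rows):
--         for c in range(columns):
--             if char_map[r][c] != WALL:
--                 continue
--
--             has_wall_neighbor = False
--
--             if r > 0 and char_map[r - 1][c] == WALL:
--                 has_wall_neighbor = True
--             if r < rows - 1 and char_map[r + 1][c] == WALL: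
--                 has_wall_neighbor = True
--             if c > 0 and char_map[r][c - 1] == WALL:
--                 has_wall_neighbor = True
--             if c < columns - 1 and char_map[r][c + 1] == WALL:
--                 has_wall_neighbor = True
--
--             if not has_wall_neighbor:
--                 new_map[r][c] = OPEN
--
--     return new_map
-- ===== SOURCE B (Python) =====
-- WALL = "*"
--
-- OPEN = "."
--
-- def remove_isolated_walls(char_map):
--     rows = len(char_map)
--     columns = len(char_map[0])
--
--     connected = set()
--     for r in range(rows):
--         for c in range(columns):
--             if char_map[r][c] == WALL:
--                 if c + 1 < columns and char_map[r][c + 1] == WALL: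
--                     connected.add((r, c))
--                     connected.add((r, c + 1))
--                 if r + 1 < rows and char_map[r + 1][c] == WALL:
--                     connected.add((r, c))
--                     connected.add((r + 1, c))
--
--     new_map = []
--     for r, row in enumerate(char_map):
--         new_row = row[:]
--         for c in range(columns):
--             if new_row[c] == WALL and (r, c) not in connected:
--                 new_row[c] = OPEN
--         new_map.append(new_row)
--     return new_map
-- ===== Notes on version B (the rewrite author's own statement) =====
-- stated objective: alternative
-- what changed: Replaces A's per-wall 4-neighbor scan with an edge-marking pass (each cell checks only its right and down neighbor, adding both endpoints of a wall-wall edge to a 'connected' set) followed by an output pass that opens walls absent from that set.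
import Mathlib
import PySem

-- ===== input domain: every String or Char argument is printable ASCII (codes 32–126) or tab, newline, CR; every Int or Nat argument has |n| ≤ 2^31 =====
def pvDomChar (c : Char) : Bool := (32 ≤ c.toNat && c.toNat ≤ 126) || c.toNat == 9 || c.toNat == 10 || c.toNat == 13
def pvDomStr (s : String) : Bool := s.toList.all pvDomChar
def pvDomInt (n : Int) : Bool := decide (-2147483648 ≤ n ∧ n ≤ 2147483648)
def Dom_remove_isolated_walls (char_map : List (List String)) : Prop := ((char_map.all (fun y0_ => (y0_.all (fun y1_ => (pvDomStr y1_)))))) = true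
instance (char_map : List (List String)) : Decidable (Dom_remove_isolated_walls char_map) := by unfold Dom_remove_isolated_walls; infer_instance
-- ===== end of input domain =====

-- B replaces A's per-wall 4-neighbor scan by marking both endpoints of every right/down wall–wall edge in a set and then opening the unmarked walls: a different decomposition of the same O(rows·columns) task (return value only; neither Python mutates its argument).

-- ===== PORT A =====
-- char_map[r][c] for Nat indices (Pre_ keeps every access of either Python in range)
def pvCell (m : List (List String)) (r c : Nat) : String := (m.getD r []).getD c ""

def remove_isolated_walls (char_map : List (List String)) : List (List String) :=
  let rows := char_map.length
  let columns := (char_map.getD 0 []).length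
  let new_map := char_map.foldl (fun nm row => nm ++ [row]) []
  (List.range rows).foldl (fun nm r =>
    (List.range columns).foldl (fun nm c =>
      if pvCell char_map r c ≠ "*" then nm
      else
        let has_wall_neighbor := false
        let has_wall_neighbor := if 0 < r ∧ pvCell char_map (r - 1) c = "*" then true else has_wall_neighbor
        let has_wall_neighbor := if r < rows - 1 ∧ pvCell char_map (r + 1) c = "*" then true else has_wall_neighbor
        let has_wall_neighbor := if 0 < c ∧ pvCell char_map r (c - 1) = "*" then true else has_wall_neighbor
        let has_wall_neighbor := if c < columns - 1 ∧ pvCell char_map r (c + 1) = "*" then true else has_wall_neighbor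
        if !has_wall_neighbor then nm.set r ((nm.getD r []).set c ".") else nm) nm) new_map

-- ===== PORT B =====
def remove_isolated_walls_alt (char_map : List (List String)) : List (List String) :=
  let rows := char_map.length
  let columns := (char_map.getD 0 []).length
  let connected : PySem.Set (Nat × Nat) :=
    (List.range rows).foldl (fun s r =>
      (List.range columns).foldl (fun s c =>
        if pvCell char_map r c = "*" then
          let s := if c + 1 < columns ∧ pvCell char_map r (c + 1) = "*" then
                     PySem.Set.add (PySem.Set.add s (r, c)) (r, c + 1) else s
          if r + 1 < rows ∧ pvCell char_map (r + 1) c = "*" then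
            PySem.Set.add (PySem.Set.add s (r, c)) (r + 1, c) else s
        else s) s) PySem.Set.empty
  char_map.zipIdx.map (fun p =>
    (List.range columns).foldl (fun new_row c =>
      if new_row.getD c "" = "*" ∧ (p.2, c) ∉ connected then new_row.set c "." else new_row) p.1)

-- ===== PRECONDITION & SPEC =====
-- Pre_ excludes exactly the inputs on which the Python A raises IndexError: the empty map (char_map[0])
-- and maps with a row shorter than the first row (char_map[r][c] for c up to len(char_map[0])).
def Pre_remove_isolated_walls (char_map : List (List String)) : Prop :=
  char_map ≠ [] ∧ ∀ row ∈ char_map, (char_map.getD 0 []).length ≤ row.length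
instance (char_map : List (List String)) : Decidable (Pre_remove_isolated_walls char_map) := by
  unfold Pre_remove_isolated_walls; infer_instance

def pvWitness_remove_isolated_walls : List (List String) := [["*", "."], [".", "*"]]

def Spec_remove_isolated_walls (char_map : List (List String)) (out : List (List String)) : Prop := out = remove_isolated_walls_alt char_map
instance (char_map : List (List String)) (out : List (List String)) : Decidable (Spec_remove_isolated_walls char_map out) := by unfold Spec_remove_isolated_walls; infer_instance

-- ===== CLAIM (what is proved, stated in full; the proofs are below) =====
def Claim_equal_remove_isolated_walls : Prop := ∀ (char_map : List (List String)), Dom_remove_isolated_walls char_map → Pre_remove_isolated_walls char_map → Spec_remove_isolated_walls char_map (remove_isolated_walls char_map)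

-- ===== LEMMAS AND PROOFS =====

-- `has_wall_neighbor` at the end of A's four checks (Bool, so it can steer `if`s without extra instances)
def pvNbr (m : List (List String)) (r c : Nat) : Bool :=
  decide (0 < r ∧ pvCell m (r - 1) c = "*") ||
  decide (r < m.length - 1 ∧ pvCell m (r + 1) c = "*") ||
  decide (0 < c ∧ pvCell m r (c - 1) = "*") ||
  decide (c < (m.getD 0 []).length - 1 ∧ pvCell m r (c + 1) = "*")

-- what row r becomes: set every c ∈ cs with cond c to "."
def pvRowOp (cond : Nat → Bool) (cs : List Nat) (row : List String) : List String :=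
  cs.foldl (fun row c => if cond c then row.set c "." else row) row

-- the cell condition both programs implement: an isolated wall
def pvCondA (m : List (List String)) (r c : Nat) : Bool :=
  (pvCell m r c == "*") && !pvNbr m r c

-- the pairs one step of B's marking pass adds
def pvAdds (m : List (List String)) (r c : Nat) : List (Nat × Nat) :=
  if pvCell m r c = "*" then
    (if c + 1 < (m.getD 0 []).length ∧ pvCell m r (c + 1) = "*" then [(r, c), (r, c + 1)] else []) ++
    (if r + 1 < m.length ∧ pvCell m (r + 1) c = "*" then [(r, c), (r + 1, c)] else [])
  else []

lemma set_fold_inner (cond : Nat → Bool) (cs : List Nat) (nm : List (List String)) (r : Nat)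
    (hr : r < nm.length) :
    cs.foldl (fun nm c => if cond c then nm.set r ((nm.getD r []).set c ".") else nm) nm
      = nm.set r (pvRowOp cond cs (nm.getD r [])) := by
  induction cs generalizing nm with
  | nil =>
      simp [pvRowOp, List.getD_eq_getElem?_getD, List.getElem?_eq_getElem hr]
  | cons c cs ih =>
      simp only [List.foldl_cons, pvRowOp]
      by_cases hc : cond c
      · simp only [hc, if_pos]
        rw [ih _ (by simpa using hr)]
        have h1 : (nm.set r ((nm.getD r []).set c ".")).getD r [] = (nm.getD r []).set c "." := by
          simp [List.getD_eq_getElem?_getD, List.getElem?_set_self', List.getElem?_eq_getElem hr]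
        rw [h1, List.set_set]
        rfl
      · simp only [hc]
        exact ih nm hr

lemma set_fold_outer (step : List (List String) → Nat → List (List String))
    (g : Nat → List String → List String) (m : List (List String)) (k : Nat)
    (hk : k ≤ m.length)
    (hstep : ∀ nm r, nm.length = m.length → r < k → step nm r = nm.set r (g r (nm.getD r []))) :
    (List.range k).foldl step m = (m.take k).mapIdx (fun r row => g r row) ++ m.drop k := by
  induction k with
  | zero => simp
  | succ k ih =>
      have hk' : k < m.length := hk
      rw [List.range_succ, List.foldl_append,
        ih (Nat.le_of_lt hk') (fun nm r h hr => hstep nm r h (Nat.lt_succ_of_lt hr))]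
      set A := (m.take k).mapIdx (fun r row => g r row) with hA
      have hlenA : A.length = k := by simp [hA, Nat.min_eq_left (Nat.le_of_lt hk')]
      have hlen : (A ++ m.drop k).length = m.length := by
        simp [hlenA]; omega
      have hget : (A ++ m.drop k).getD k [] = m[k] := by
        rw [List.getD_eq_getElem?_getD, List.getElem?_append_right (by omega)]
        simp [hlenA, List.getElem?_drop, List.getElem?_eq_getElem hk']
      have hdropset : (m.drop k).set 0 (g k m[k]) = g k m[k] :: m.drop (k+1) := by
        rw [List.drop_eq_getElem_cons hk']; rfl
      have hset : (A ++ m.drop k).set k (g k m[k]) = A ++ g k m[k] :: m.drop (k+1) := by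
        rw [List.set_append_right _ _ (by omega)]
        rw [hlenA]; simp [hdropset]
      have htake : (m.take (k+1)).mapIdx (fun r row => g r row) = A ++ [g k m[k]] := by
        rw [List.take_add_one, List.getElem?_eq_getElem hk']
        simp only [Option.toList_some, hA]
        rw [List.mapIdx_concat]
        simp [Nat.min_eq_left (Nat.le_of_lt hk')]
      simp only [List.foldl_cons, List.foldl_nil,
        hstep _ k hlen (Nat.lt_succ_self k), hget, hset, htake]
      simp

-- A's cell body, rewritten: the four-check chain computes pvNbr
lemma body_eq (m : List (List String)) (r : Nat) :
    (fun (nm : List (List String)) (c : Nat) =>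
      if pvCell m r c ≠ "*" then nm
      else if !(if c < (m.getD 0 []).length - 1 ∧ pvCell m r (c + 1) = "*" then true
            else if 0 < c ∧ pvCell m r (c - 1) = "*" then true
            else if r < m.length - 1 ∧ pvCell m (r + 1) c = "*" then true
            else if 0 < r ∧ pvCell m (r - 1) c = "*" then true else false)
           then nm.set r ((nm.getD r []).set c ".") else nm)
    = (fun (nm : List (List String)) (c : Nat) =>
        if pvCondA m r c then nm.set r ((nm.getD r []).set c ".") else nm) := by
  funext nm c
  have hchain : (if c < (m.getD 0 []).length - 1 ∧ pvCell m r (c + 1) = "*" then true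
            else if 0 < c ∧ pvCell m r (c - 1) = "*" then true
            else if r < m.length - 1 ∧ pvCell m (r + 1) c = "*" then true
            else if 0 < r ∧ pvCell m (r - 1) c = "*" then true else false) = pvNbr m r c := by
    simp only [pvNbr]
    split_ifs <;> simp_all
  rw [hchain]
  by_cases hcell : pvCell m r c = "*"
  · simp [pvCondA, hcell]
  · simp [pvCondA, hcell]

lemma A_eq (m : List (List String)) :
    remove_isolated_walls m
      = m.mapIdx (fun r row => pvRowOp (pvCondA m r) (List.range ((m.getD 0 []).length)) row) := by
  simp only [remove_isolated_walls]
  rw [PySem.List.foldl_append_singleton_eq_self, List.nil_append]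
  calc (List.range m.length).foldl _ m
      = (m.take m.length).mapIdx
          (fun r row => pvRowOp (pvCondA m r) (List.range ((m.getD 0 []).length)) row) ++
          m.drop m.length := by
        apply set_fold_outer _ _ m m.length le_rfl
        intro nm r hlen _
        rw [body_eq m r]
        exact set_fold_inner (pvCondA m r) _ nm r (by omega)
    _ = m.mapIdx (fun r row => pvRowOp (pvCondA m r) (List.range ((m.getD 0 []).length)) row) := by
        simp

-- membership in a fold of set-extending steps
lemma mem_fold_gen {α : Type} [DecidableEq α] (F : PySem.Set α → Nat → PySem.Set α)
    (Q : Nat → α → Prop) (hF : ∀ s i x, x ∈ F s i ↔ x ∈ s ∨ Q i x) (l : List Nat)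
    (s : PySem.Set α) (x : α) :
    x ∈ l.foldl F s ↔ x ∈ s ∨ ∃ i ∈ l, Q i x := by
  induction l generalizing s with
  | nil => simp
  | cons i l ih =>
      rw [List.foldl_cons, ih, hF]
      simp only [List.mem_cons]
      constructor
      · rintro ((h | h) | ⟨j, hj, h⟩)
        · exact Or.inl h
        · exact Or.inr ⟨i, Or.inl rfl, h⟩
        · exact Or.inr ⟨j, Or.inr hj, h⟩
      · rintro (h | ⟨j, (rfl | hj), h⟩)
        · exact Or.inl (Or.inl h)
        · exact Or.inl (Or.inr h)
        · exact Or.inr ⟨j, hj, h⟩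

-- one step of B's marking loop extends the set by pvAdds
lemma step_adds (m : List (List String)) (r c : Nat) (s : PySem.Set (Nat × Nat)) (x : Nat × Nat) :
    x ∈ (if pvCell m r c = "*" then
          if r + 1 < m.length ∧ pvCell m (r + 1) c = "*" then
            PySem.Set.add (PySem.Set.add (if c + 1 < (m.getD 0 []).length ∧ pvCell m r (c + 1) = "*" then
              PySem.Set.add (PySem.Set.add s (r, c)) (r, c + 1) else s) (r, c)) (r + 1, c)
          else if c + 1 < (m.getD 0 []).length ∧ pvCell m r (c + 1) = "*" then
            PySem.Set.add (PySem.Set.add s (r, c)) (r, c + 1) else s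
        else s) ↔ x ∈ s ∨ x ∈ pvAdds m r c := by
  unfold pvAdds
  split_ifs <;> simp [PySem.Set.mem_add] <;> tauto

-- B's `connected` set holds exactly the walls with a wall neighbor
lemma mem_connected (m : List (List String)) (a b : Nat) :
    ((a, b) ∈ (List.range m.length).foldl (fun s r =>
      (List.range ((m.getD 0 []).length)).foldl (fun s c =>
        if pvCell m r c = "*" then
          if r + 1 < m.length ∧ pvCell m (r + 1) c = "*" then
            PySem.Set.add (PySem.Set.add (if c + 1 < (m.getD 0 []).length ∧ pvCell m r (c + 1) = "*" then
              PySem.Set.add (PySem.Set.add s (r, c)) (r, c + 1) else s) (r, c)) (r + 1, c)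
          else if c + 1 < (m.getD 0 []).length ∧ pvCell m r (c + 1) = "*" then
            PySem.Set.add (PySem.Set.add s (r, c)) (r, c + 1) else s
        else s) s) PySem.Set.empty)
      ↔ (a < m.length ∧ b < (m.getD 0 []).length ∧ pvCell m a b = "*" ∧ pvNbr m a b = true) := by
  rw [mem_fold_gen _ (fun r x => ∃ c ∈ List.range ((m.getD 0 []).length), x ∈ pvAdds m r c)
      (fun s r x => mem_fold_gen _ (fun c x => x ∈ pvAdds m r c) (fun s c x => step_adds m r c s x) _ s x)]
  simp only [PySem.Set.empty, List.not_mem_nil, false_or, List.mem_range]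
  simp only [pvNbr, Bool.or_eq_true, decide_eq_true_eq]
  constructor
  · rintro ⟨r, hr, c, hc, hmem⟩
    unfold pvAdds at hmem
    by_cases h0 : pvCell m r c = "*"
    swap
    · rw [if_neg h0] at hmem; simp at hmem
    rw [if_pos h0] at hmem
    simp only [List.mem_append] at hmem
    rcases hmem with hm | hm
    · by_cases h1 : c + 1 < (m.getD 0 []).length ∧ pvCell m r (c + 1) = "*"
      swap
      · rw [if_neg h1] at hm; simp at hm
      rw [if_pos h1] at hm
      simp only [List.mem_cons, List.not_mem_nil, or_false, Prod.mk.injEq] at hm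
      rcases hm with ⟨rfl, rfl⟩ | ⟨rfl, rfl⟩
      · have hx : b < (m.getD 0 []).length - 1 ∧ pvCell m a (b + 1) = "*" := ⟨by omega, h1.2⟩
        exact ⟨hr, hc, h0, by tauto⟩
      · have hx : 0 < c + 1 ∧ pvCell m a (c + 1 - 1) = "*" := ⟨by omega, by simpa using h0⟩
        exact ⟨hr, h1.1, h1.2, by tauto⟩
    · by_cases h2 : r + 1 < m.length ∧ pvCell m (r + 1) c = "*"
      swap
      · rw [if_neg h2] at hm; simp at hm
      rw [if_pos h2] at hm
      simp only [List.mem_cons, List.not_mem_nil, or_false, Prod.mk.injEq] at hm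
      rcases hm with ⟨rfl, rfl⟩ | ⟨rfl, rfl⟩
      · have hx : a < m.length - 1 ∧ pvCell m (a + 1) b = "*" := ⟨by omega, h2.2⟩
        exact ⟨hr, hc, h0, by tauto⟩
      · have hx : 0 < r + 1 ∧ pvCell m (r + 1 - 1) b = "*" := ⟨by omega, by simpa using h0⟩
        exact ⟨h2.1, hc, h2.2, by tauto⟩
  · rintro ⟨ha, hb, hwall, hnbr⟩
    rcases hnbr with ((⟨h0a, hup⟩ | ⟨hlt, hdown⟩) | ⟨h0b, hleft⟩) | ⟨hltb, hright⟩
    · refine ⟨a - 1, by omega, b, hb, ?_⟩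
      unfold pvAdds
      have e : a - 1 + 1 = a := by omega
      rw [if_pos hup]
      simp only [e, List.mem_append]
      right
      rw [if_pos ⟨by omega, hwall⟩]
      simp
    · refine ⟨a, ha, b, hb, ?_⟩
      unfold pvAdds
      rw [if_pos hwall]
      simp only [List.mem_append]
      right
      rw [if_pos ⟨by omega, hdown⟩]
      simp
    · refine ⟨a, ha, b - 1, by omega, ?_⟩
      unfold pvAdds
      have e : b - 1 + 1 = b := by omega
      rw [if_pos hleft]
      simp only [e, List.mem_append]
      left
      rw [if_pos ⟨by omega, hwall⟩]
      simp
    · refine ⟨a, ha, b, hb, ?_⟩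
      unfold pvAdds
      rw [if_pos hwall]
      simp only [List.mem_append]
      left
      rw [if_pos ⟨by omega, hright⟩]
      simp

-- B's output pass may read the original row: earlier writes hit only earlier (distinct) columns
lemma rowB_reads (P : Nat → Prop) [DecidablePred P] (cs : List Nat) (h : cs.Nodup) :
    ∀ (row row₀ : List String), (∀ c ∈ cs, row.getD c "" = row₀.getD c "") →
    cs.foldl (fun row c => if row.getD c "" = "*" ∧ P c then row.set c "." else row) row
      = pvRowOp (fun c => (row₀.getD c "" == "*") && decide (P c)) cs row := by
  induction cs with
  | nil => intro row row₀ _; simp [pvRowOp]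
  | cons c cs ih =>
      intro row row₀ hread
      have hc : row.getD c "" = row₀.getD c "" := hread c (List.mem_cons_self)
      have hnodup := h.of_cons
      have hcnot : c ∉ cs := (List.nodup_cons.mp h).1
      simp only [List.foldl_cons, pvRowOp]
      by_cases hcond : row₀.getD c "" = "*" ∧ P c
      · have hbc : ((row₀.getD c "" == "*") && decide (P c)) = true := by
          rw [Bool.and_eq_true, beq_iff_eq, decide_eq_true_iff]
          exact ⟨hcond.1, hcond.2⟩
        rw [if_pos (by rw [hc]; exact hcond), if_pos hbc]
        have hread' : ∀ c' ∈ cs, (row.set c ".").getD c' "" = row₀.getD c' "" := by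
          intro c' hc'
          have hne : c' ≠ c := fun he => hcnot (he ▸ hc')
          rw [List.getD_eq_getElem?_getD, List.getElem?_set_ne (by omega),
            ← List.getD_eq_getElem?_getD]
          exact hread c' (List.mem_cons_of_mem _ hc')
        exact ih hnodup _ _ hread'
      · have hbc : ((row₀.getD c "" == "*") && decide (P c)) = false := by
          rw [Bool.and_eq_false_iff, beq_eq_false_iff_ne, ne_eq, decide_eq_false_iff_not]
          exact Decidable.not_and_iff_not_or_not.mp hcond
        rw [if_neg (by rw [hc]; exact hcond), if_neg (ne_true_of_eq_false hbc)]
        exact ih hnodup _ _ (fun c' hc' => hread c' (List.mem_cons_of_mem _ hc'))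

-- the Bool condition B tests equals A's isolated-wall condition, inside the grid
lemma condB_eq (m : List (List String)) (T : List (Nat × Nat))
    (hT : ∀ a b : Nat, ((a, b) ∈ T) ↔ (a < m.length ∧ b < (m.getD 0 []).length ∧
      pvCell m a b = "*" ∧ pvNbr m a b = true))
    (i c : Nat) (hi : i < m.length) (hc : c < (m.getD 0 []).length) :
    ((m[i].getD c "" == "*") && decide ((i, c) ∉ T)) = pvCondA m i c := by
  have hcell : m[i].getD c "" = pvCell m i c := by
    unfold pvCell
    rw [List.getD_eq_getElem?_getD (l := m), List.getElem?_eq_getElem hi]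
    rfl
  rw [hcell, pvCondA]
  by_cases hw : pvCell m i c = "*"
  · have hiff : ((i, c) ∈ T) ↔ (pvNbr m i c = true) :=
      ⟨fun h => ((hT i c).mp h).2.2.2, fun h => (hT i c).mpr ⟨hi, hc, hw, h⟩⟩
    rw [decide_not, decide_eq_decide.mpr hiff, Bool.decide_eq_true]
  · have h1 : (pvCell m i c == "*") = false := by simpa using hw
    rw [h1, Bool.false_and, Bool.false_and]

lemma B_eq (m : List (List String)) :
    remove_isolated_walls_alt m
      = m.mapIdx (fun r row => pvRowOp (pvCondA m r) (List.range ((m.getD 0 []).length)) row) := by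
  simp only [remove_isolated_walls_alt]
  rw [List.mapIdx_eq_zipIdx_map]
  apply List.map_congr_left
  intro p hp
  obtain ⟨i, hi, hpe⟩ := List.mem_iff_getElem.mp hp
  have hi' : i < m.length := by simpa using hi
  rw [List.getElem_zipIdx] at hpe
  subst hpe
  simp only [Nat.zero_add]
  rw [rowB_reads _ (List.range ((m.getD 0 []).length)) (List.nodup_range) _ m[i]
    (fun _ _ => rfl)]
  unfold pvRowOp
  apply PySem.List.foldl_congr_mem
  intro row c hcmem
  beta_reduce
  rw [condB_eq m _ (fun a b => mem_connected m a b) i c hi' (List.mem_range.mp hcmem)]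

-- ===== VERDICT (by name: the statement is the Claim_ definition above) =====
theorem remove_isolated_walls_spec : Claim_equal_remove_isolated_walls := by
  intro m _ _
  unfold Spec_remove_isolated_walls
  rw [A_eq, B_eq]
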